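-- pv_equiv track=rewrite | github.com/dimalei/advent_of_code_2024 | 08_resonant_colinearity/resonant_colinearity_part2.py | get_resonace_loactions
-- ===== SOURCE A (Python) =====
-- def get_resonace_loactions(max_x: int, max_y: int, antenna1: tuple, antenna2: tuple):
--     dx, dy = (antenna1[0] - antenna2[0], antenna1[1] - antenna2[1])
--     resonances = set()
--
--     # 1st direction
--     n = 1
--     while True:
--         r_x = antenna1[0] + dx * n
--         r_y = antenna1[1] + dy * n
--         if (r_x < 0 or r_x > max_x or r_y < 0 or r_y > max_y):
--             break
--         resonances.add((r_x, r_y))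
--         n += 1
--
--     # 2nd direction
--     n = 1
--     while True:
--         r_x = antenna2[0] - dx * n
--         r_y = antenna2[1] - dy * n
--         if (r_x < 0 or r_x > max_x or r_y < 0 or r_y > max_y):
--             break
--         resonances.add((r_x, r_y))
--         n += 1
--
--     #adding the antennas themselves
--     resonances.add(antenna1)
--     resonances.add(antenna2)
--
--     return resonances
-- ===== SOURCE B (Python) =====
-- def _axis_bounds(c, d, m):
--     # closed-form k-interval of { k : 0 <= c + d*k <= m } for d != 0,
--     # using only floor divisions by the positive e = abs(d)
--     e = abs(d)
--     if d > 0: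
--         return -(c // e), (m - c) // e
--     return -((m - c) // e), c // e
--
--
-- def get_resonace_loactions(max_x, max_y, antenna1, antenna2):
--     a1x, a1y = antenna1
--     dx, dy = a1x - antenna2[0], a1y - antenna2[1]
--     base = {antenna1, antenna2}
--     if dx == 0:
--         if dy == 0 or a1x < 0 or a1x > max_x:
--             return base
--         lo, hi = _axis_bounds(a1y, dy, max_y)
--     elif dy == 0:
--         if a1y < 0 or a1y > max_y:
--             return base
--         lo, hi = _axis_bounds(a1x, dx, max_x)
--     else:
--         lox, hix = _axis_bounds(a1x, dx, max_x)
--         loy, hiy = _axis_bounds(a1y, dy, max_y)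
--         lo, hi = max(lox, loy), min(hix, hiy)
--     # antenna1 is k = 0, antenna2 is k = -1; A collects k = 1.. and k = -2.. contiguously
--     fwd = [(a1x + dx * k, a1y + dy * k) for k in range(1, hi + 1)] if lo <= 1 else []
--     bwd = [(a1x + dx * k, a1y + dy * k) for k in range(-2, lo - 1, -1)] if hi >= -2 else []
--     return set(fwd + bwd + [antenna1, antenna2])
-- ===== Notes on version B (the rewrite author's own statement) =====
-- stated objective: alternative
-- what changed: A steps outward point-by-point in two unbounded while-loops, bounds-testing every candidate; B computes the closed-form integer interval of line multiples k that stay inside the grid (per-axis ceil/floor division, intersected), then emits the two contiguous k-ranges directly and adds the antennas.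
-- outside the precondition, e.g. on get_resonace_loactions(5, 5, (2, 2), (2, 2)): A does not finish within the time limit, B returns {(2, 2)}
import Mathlib
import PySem

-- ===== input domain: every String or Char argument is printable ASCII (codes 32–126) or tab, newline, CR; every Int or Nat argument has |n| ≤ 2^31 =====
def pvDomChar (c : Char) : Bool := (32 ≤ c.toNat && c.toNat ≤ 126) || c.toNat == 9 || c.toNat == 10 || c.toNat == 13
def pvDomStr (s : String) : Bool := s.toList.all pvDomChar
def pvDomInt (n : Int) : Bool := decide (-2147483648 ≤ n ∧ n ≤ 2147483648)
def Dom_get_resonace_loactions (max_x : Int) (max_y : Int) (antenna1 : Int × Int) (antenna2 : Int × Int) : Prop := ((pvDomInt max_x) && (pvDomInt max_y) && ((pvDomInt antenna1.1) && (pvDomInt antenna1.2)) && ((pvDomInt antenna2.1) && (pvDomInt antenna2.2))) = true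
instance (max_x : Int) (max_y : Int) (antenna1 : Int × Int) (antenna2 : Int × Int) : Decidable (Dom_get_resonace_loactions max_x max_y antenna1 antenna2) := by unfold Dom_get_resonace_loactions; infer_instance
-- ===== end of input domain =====

-- B replaces A's two step-and-test while-loops by a closed-form (ceil/floor) k-interval of in-grid
-- line multiples, emitted with two range comprehensions (objective: alternative; return value only).

-- ===== PORT A =====
-- first while-loop: resonances outward from antenna1 (n = 1, 2, …); fuel-bounded recursion,
-- the fuel chosen at the call site strictly exceeds the iteration count whenever the loop terminates
def pvALoop1 (max_x max_y a1x a1y dx dy : Int) : Nat → Int → PySem.Set (Int × Int) → PySem.Set (Int × Int)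
  | 0, _, s => s
  | fuel+1, n, s =>
    let r_x := a1x + dx * n
    let r_y := a1y + dy * n
    if r_x < 0 ∨ r_x > max_x ∨ r_y < 0 ∨ r_y > max_y then s
    else pvALoop1 max_x max_y a1x a1y dx dy fuel (n+1) (PySem.Set.add s (r_x, r_y))

-- second while-loop: outward from antenna2
def pvALoop2 (max_x max_y a2x a2y dx dy : Int) : Nat → Int → PySem.Set (Int × Int) → PySem.Set (Int × Int)
  | 0, _, s => s
  | fuel+1, n, s =>
    let r_x := a2x - dx * n
    let r_y := a2y - dy * n
    if r_x < 0 ∨ r_x > max_x ∨ r_y < 0 ∨ r_y > max_y then s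
    else pvALoop2 max_x max_y a2x a2y dx dy fuel (n+1) (PySem.Set.add s (r_x, r_y))

def get_resonace_loactions (max_x : Int) (max_y : Int) (antenna1 : Int × Int) (antenna2 : Int × Int) : List (Int × Int) :=
  let dx := antenna1.1 - antenna2.1
  let dy := antenna1.2 - antenna2.2
  let fuel := max_x.toNat + max_y.toNat + 4
  let s1 := pvALoop1 max_x max_y antenna1.1 antenna1.2 dx dy fuel 1 PySem.Set.empty
  let s2 := pvALoop2 max_x max_y antenna2.1 antenna2.2 dx dy fuel 1 s1
  PySem.Set.add (PySem.Set.add s2 antenna1) antenna2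

-- ===== PORT B =====
-- closed-form k-interval of { k : 0 <= c + d*k <= m } for d ≠ 0 (divisions by the positive e = |d|)
def pvAxisBounds (c d m : Int) : Int × Int :=
  let e := |d|
  if d > 0 then (-(PySem.Int.floordiv c e), PySem.Int.floordiv (m - c) e)
  else (-(PySem.Int.floordiv (m - c) e), PySem.Int.floordiv c e)

def get_resonace_loactions_alt (max_x : Int) (max_y : Int) (antenna1 : Int × Int) (antenna2 : Int × Int) : List (Int × Int) :=
  let a1x := antenna1.1
  let a1y := antenna1.2
  let dx := a1x - antenna2.1
  let dy := a1y - antenna2.2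
  if dx = 0 ∧ (dy = 0 ∨ a1x < 0 ∨ a1x > max_x) then PySem.Set.ofList [antenna1, antenna2]
  else if dx ≠ 0 ∧ dy = 0 ∧ (a1y < 0 ∨ a1y > max_y) then PySem.Set.ofList [antenna1, antenna2]
  else
    let lohi :=
      if dx = 0 then pvAxisBounds a1y dy max_y
      else if dy = 0 then pvAxisBounds a1x dx max_x
      else
        let bx := pvAxisBounds a1x dx max_x
        let by_ := pvAxisBounds a1y dy max_y
        (max bx.1 by_.1, min bx.2 by_.2)
    let lo := lohi.1
    let hi := lohi.2
    -- antenna1 is k = 0, antenna2 is k = -1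
    let fwd := if lo ≤ 1 then (PySem.List.pyRange 1 (hi+1) 1).map (fun k => (a1x + dx * k, a1y + dy * k)) else []
    let bwd := if hi ≥ -2 then (PySem.List.pyRange (-2) (lo-1) (-1)).map (fun k => (a1x + dx * k, a1y + dy * k)) else []
    PySem.Set.ofList (fwd ++ bwd ++ [antenna1, antenna2])

-- ===== PRECONDITION & SPEC =====
-- Pre_ excludes exactly the inputs on which A never returns: antenna1 = antenna2 with the antenna
-- inside the grid makes A's first while-loop spin forever on the antenna itself.
def Pre_get_resonace_loactions (max_x : Int) (max_y : Int) (antenna1 : Int × Int) (antenna2 : Int × Int) : Prop :=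
  ¬ (antenna1 = antenna2 ∧ 0 ≤ antenna1.1 ∧ antenna1.1 ≤ max_x ∧ 0 ≤ antenna1.2 ∧ antenna1.2 ≤ max_y)
instance (max_x : Int) (max_y : Int) (antenna1 : Int × Int) (antenna2 : Int × Int) : Decidable (Pre_get_resonace_loactions max_x max_y antenna1 antenna2) := by unfold Pre_get_resonace_loactions; infer_instance

def pvWitness_get_resonace_loactions : Int × Int × (Int × Int) × (Int × Int) := (9, 9, (2, 3), (3, 5))

def Spec_get_resonace_loactions (max_x : Int) (max_y : Int) (antenna1 : Int × Int) (antenna2 : Int × Int) (out : List (Int × Int)) : Prop := out = get_resonace_loactions_alt max_x max_y antenna1 antenna2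
instance (max_x : Int) (max_y : Int) (antenna1 : Int × Int) (antenna2 : Int × Int) (out : List (Int × Int)) : Decidable (Spec_get_resonace_loactions max_x max_y antenna1 antenna2 out) := by unfold Spec_get_resonace_loactions; infer_instance

-- ===== CLAIM (what is proved, stated in full; the proofs are below) =====
def Claim_equal_get_resonace_loactions : Prop := ∀ (max_x : Int) (max_y : Int) (antenna1 : Int × Int) (antenna2 : Int × Int), Dom_get_resonace_loactions max_x max_y antenna1 antenna2 → Pre_get_resonace_loactions max_x max_y antenna1 antenna2 → Spec_get_resonace_loactions max_x max_y antenna1 antenna2 (get_resonace_loactions max_x max_y antenna1 antenna2)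

-- ===== LEMMAS AND PROOFS =====

-- the closed-form interval of pvAxisBounds is exact
theorem pvAxisBounds_char (c d m : Int) (hd : d ≠ 0) (k : Int) :
    ((pvAxisBounds c d m).1 ≤ k ∧ k ≤ (pvAxisBounds c d m).2) ↔ (0 ≤ c + d * k ∧ c + d * k ≤ m) := by
  unfold pvAxisBounds
  rcases lt_or_gt_of_ne hd with hneg | hpos
  · rw [if_neg (by omega), abs_of_neg hneg]
    dsimp only
    rw [neg_le, PySem.Int.le_floordiv_iff_mul_le (by omega), PySem.Int.le_floordiv_iff_mul_le (by omega)]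
    constructor <;> intro h <;> constructor <;> nlinarith [h.1, h.2]
  · rw [if_pos (by omega), abs_of_pos hpos]
    dsimp only
    rw [neg_le, PySem.Int.le_floordiv_iff_mul_le (by omega), PySem.Int.le_floordiv_iff_mul_le (by omega)]
    constructor <;> intro h <;> constructor <;> nlinarith [h.1, h.2]

-- two in-range multiples of a nonzero step are at most m apart
theorem pv_steps_bound (c d m j k : Int) (hd : d ≠ 0) (hjk : j ≤ k)
    (h1 : 0 ≤ c + d * j) (h2 : c + d * j ≤ m) (h3 : 0 ≤ c + d * k) (h4 : c + d * k ≤ m) :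
    k - j ≤ m := by
  rcases lt_or_gt_of_ne hd with hneg | hpos
  · nlinarith
  · nlinarith

-- A's first loop collects exactly the multiples k = n, n+1, …, hi (nothing if k = n is already bad)
theorem pvALoop1_eq (max_x max_y a1x a1y dx dy lo hi : Int)
    (hchar : ∀ k : Int, (lo ≤ k ∧ k ≤ hi) ↔
      (0 ≤ a1x + dx * k ∧ a1x + dx * k ≤ max_x ∧ 0 ≤ a1y + dy * k ∧ a1y + dy * k ≤ max_y)) :
    ∀ (fuel : Nat) (n : Int) (s : PySem.Set (Int × Int)), (lo ≤ n → hi + 1 - n ≤ (fuel : Int)) →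
      pvALoop1 max_x max_y a1x a1y dx dy fuel n s =
        List.foldl PySem.Set.add s
          (if lo ≤ n then (PySem.List.pyRange n (hi+1) 1).map (fun k => (a1x + dx * k, a1y + dy * k)) else []) := by
  intro fuel
  induction fuel with
  | zero =>
    intro n s hfuel
    by_cases hlo : lo ≤ n
    · rw [if_pos hlo, PySem.List.pyRange_one_eq_nil (by have := hfuel hlo; omega)]
      simp [pvALoop1]
    · rw [if_neg hlo]; simp [pvALoop1]
  | succ fuel ih =>
    intro n s hfuel
    show (if a1x + dx * n < 0 ∨ a1x + dx * n > max_x ∨ a1y + dy * n < 0 ∨ a1y + dy * n > max_y then s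
          else pvALoop1 max_x max_y a1x a1y dx dy fuel (n+1) (PySem.Set.add s (a1x + dx * n, a1y + dy * n))) = _
    by_cases hcond : a1x + dx * n < 0 ∨ a1x + dx * n > max_x ∨ a1y + dy * n < 0 ∨ a1y + dy * n > max_y
    · rw [if_pos hcond]
      have hnot : ¬ (lo ≤ n ∧ n ≤ hi) := by
        intro hin
        have := (hchar n).mp hin
        rcases hcond with h | h | h | h <;> omega
      by_cases hlo : lo ≤ n
      · rw [if_pos hlo, PySem.List.pyRange_one_eq_nil (by omega)]; simp
      · rw [if_neg hlo]; simp
    · rw [if_neg hcond]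
      push_neg at hcond
      have hin : lo ≤ n ∧ n ≤ hi := (hchar n).mpr (by omega)
      have hfin := hfuel hin.1
      rw [ih (n+1) _ (fun _ => by omega)]
      rw [if_pos hin.1, if_pos (show lo ≤ n + 1 by omega),
        @PySem.List.pyRange_one_cons n (hi+1) (by omega)]
      simp

-- A's second loop collects exactly the multiples k = -1-n, -2-n, …, lo (k counted from antenna1)
theorem pvALoop2_eq (max_x max_y a1x a1y a2x a2y dx dy lo hi : Int)
    (ha2x : a2x = a1x - dx) (ha2y : a2y = a1y - dy)
    (hchar : ∀ k : Int, (lo ≤ k ∧ k ≤ hi) ↔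
      (0 ≤ a1x + dx * k ∧ a1x + dx * k ≤ max_x ∧ 0 ≤ a1y + dy * k ∧ a1y + dy * k ≤ max_y)) :
    ∀ (fuel : Nat) (n : Int) (s : PySem.Set (Int × Int)), (-1 - n ≤ hi → (-1 - n) - lo + 1 ≤ (fuel : Int)) →
      pvALoop2 max_x max_y a2x a2y dx dy fuel n s =
        List.foldl PySem.Set.add s
          (if -1 - n ≤ hi then (PySem.List.pyRange (-1-n) (lo-1) (-1)).map (fun k => (a1x + dx * k, a1y + dy * k)) else []) := by
  intro fuel
  induction fuel with
  | zero =>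
    intro n s hfuel
    by_cases hhi : -1 - n ≤ hi
    · rw [if_pos hhi, PySem.List.pyRange_neg_one_eq_nil (by have := hfuel hhi; omega)]
      simp [pvALoop2]
    · rw [if_neg hhi]; simp [pvALoop2]
  | succ fuel ih =>
    intro n s hfuel
    show (if a2x - dx * n < 0 ∨ a2x - dx * n > max_x ∨ a2y - dy * n < 0 ∨ a2y - dy * n > max_y then s
          else pvALoop2 max_x max_y a2x a2y dx dy fuel (n+1) (PySem.Set.add s (a2x - dx * n, a2y - dy * n))) = _
    have hx : a2x - dx * n = a1x + dx * (-1 - n) := by rw [ha2x]; ring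
    have hy : a2y - dy * n = a1y + dy * (-1 - n) := by rw [ha2y]; ring
    by_cases hcond : a2x - dx * n < 0 ∨ a2x - dx * n > max_x ∨ a2y - dy * n < 0 ∨ a2y - dy * n > max_y
    · rw [if_pos hcond]
      rw [hx, hy] at hcond
      have hnot : ¬ (lo ≤ -1 - n ∧ -1 - n ≤ hi) := by
        intro hin
        have := (hchar (-1 - n)).mp hin
        rcases hcond with h | h | h | h <;> omega
      by_cases hhi : -1 - n ≤ hi
      · rw [if_pos hhi, PySem.List.pyRange_neg_one_eq_nil (by omega)]; simp
      · rw [if_neg hhi]; simp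
    · rw [if_neg hcond]
      rw [hx, hy] at hcond
      push_neg at hcond
      have hin : lo ≤ -1 - n ∧ -1 - n ≤ hi := (hchar (-1 - n)).mpr (by omega)
      have hfin := hfuel hin.2
      rw [ih (n+1) _ (fun _ => by omega)]
      rw [if_pos hin.2, if_pos (show -1 - (n + 1) ≤ hi by omega),
        @PySem.List.pyRange_neg_one_cons (-1-n) (lo-1) (by omega)]
      have he : (-1 : Int) - n - 1 = -1 - (n + 1) := by ring
      rw [he, hx, hy]
      simp

-- assembling A's whole body, for any (lo, hi) that exactly characterises the in-grid multiples
theorem pvAssemble (max_x max_y a1x a1y a2x a2y lo hi : Int)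
    (hchar : ∀ k : Int, (lo ≤ k ∧ k ≤ hi) ↔
      (0 ≤ a1x + (a1x - a2x) * k ∧ a1x + (a1x - a2x) * k ≤ max_x ∧
       0 ≤ a1y + (a1y - a2y) * k ∧ a1y + (a1y - a2y) * k ≤ max_y)) :
    get_resonace_loactions max_x max_y (a1x, a1y) (a2x, a2y) =
      PySem.Set.ofList
        ((if lo ≤ 1 then (PySem.List.pyRange 1 (hi+1) 1).map (fun k => (a1x + (a1x - a2x) * k, a1y + (a1y - a2y) * k)) else []) ++
         (if hi ≥ -2 then (PySem.List.pyRange (-2) (lo-1) (-1)).map (fun k => (a1x + (a1x - a2x) * k, a1y + (a1y - a2y) * k)) else []) ++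
         [(a1x, a1y), (a2x, a2y)]) := by
  have hnn : ∀ k : Int, (0 ≤ a1x + (a1x - a2x) * k ∧ a1x + (a1x - a2x) * k ≤ max_x ∧
      0 ≤ a1y + (a1y - a2y) * k ∧ a1y + (a1y - a2y) * k ≤ max_y) → 0 ≤ max_x ∧ 0 ≤ max_y := by
    rintro k ⟨h1, h2, h3, h4⟩
    constructor <;> linarith
  have hsb : ∀ j k : Int, j ≤ k →
      (0 ≤ a1x + (a1x - a2x) * j ∧ a1x + (a1x - a2x) * j ≤ max_x ∧
       0 ≤ a1y + (a1y - a2y) * j ∧ a1y + (a1y - a2y) * j ≤ max_y) →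
      (0 ≤ a1x + (a1x - a2x) * k ∧ a1x + (a1x - a2x) * k ≤ max_x ∧
       0 ≤ a1y + (a1y - a2y) * k ∧ a1y + (a1y - a2y) * k ≤ max_y) →
      k - j ≤ max_x + max_y := by
    rintro j k hjk ⟨h1, h2, h3, h4⟩ ⟨h5, h6, h7, h8⟩
    by_cases hdx : a1x - a2x = 0
    · by_cases hdy : a1y - a2y = 0
      · exfalso
        simp only [hdx, hdy, zero_mul, add_zero] at h1 h2 h3 h4
        have hall : ∀ t : Int, lo ≤ t ∧ t ≤ hi := by
          intro t
          exact (hchar t).mpr (by simp only [hdx, hdy, zero_mul, add_zero]; exact ⟨h1, h2, h3, h4⟩)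
        have ha := hall (hi + 1)
        have hb := hall (hi - 1)
        omega
      · have hb := pv_steps_bound a1y (a1y - a2y) max_y j k hdy hjk h3 h4 h7 h8
        linarith
    · have hb := pv_steps_bound a1x (a1x - a2x) max_x j k hdx hjk h1 h2 h5 h6
      linarith
  have hf1 : lo ≤ (1:Int) → hi + 1 - 1 ≤ ((Int.toNat max_x + Int.toNat max_y + 4 : Nat) : Int) := by
    intro hlo
    by_cases hhi : hi ≤ 0
    · omega
    · have hc1 := (hchar 1).mp ⟨hlo, by omega⟩
      have hch := (hchar hi).mp ⟨by omega, le_refl hi⟩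
      have hb := hsb 1 hi (by omega) hc1 hch
      have hm := hnn 1 hc1
      omega
  have hf2 : (-1:Int) - 1 ≤ hi → ((-1:Int) - 1) - lo + 1 ≤ ((Int.toNat max_x + Int.toNat max_y + 4 : Nat) : Int) := by
    intro hhi
    by_cases hlo : (-1:Int) ≤ lo
    · omega
    · have hcl := (hchar lo).mp ⟨le_refl lo, by omega⟩
      have hc2 := (hchar (-2)).mp ⟨by omega, by omega⟩
      have hb := hsb lo (-2) (by omega) hcl hc2
      have hm := hnn lo hcl
      omega
  simp only [get_resonace_loactions]
  rw [pvALoop1_eq max_x max_y a1x a1y (a1x - a2x) (a1y - a2y) lo hi hchar _ 1 _ hf1]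
  rw [pvALoop2_eq max_x max_y a1x a1y a2x a2y (a1x - a2x) (a1y - a2y) lo hi (by ring) (by ring)
    hchar _ 1 _ hf2]
  rw [PySem.Set.ofList_eq_foldl, List.foldl_append, List.foldl_append]
  have hm2 : (-1:Int) - 1 = -2 := by norm_num
  simp only [hm2, ge_iff_le, PySem.Set.empty, List.foldl_cons, List.foldl_nil]

-- ===== VERDICT (by name: the statement is the Claim_ definition above) =====
theorem get_resonace_loactions_spec : Claim_equal_get_resonace_loactions := by
  unfold Claim_equal_get_resonace_loactions
  rintro max_x max_y ⟨a1x, a1y⟩ ⟨a2x, a2y⟩ _hdom hpre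
  unfold Pre_get_resonace_loactions at hpre
  unfold Spec_get_resonace_loactions
  simp only [get_resonace_loactions_alt]
  by_cases h1 : a1x - a2x = 0 ∧ (a1y - a2y = 0 ∨ a1x < 0 ∨ a1x > max_x)
  · rw [if_pos h1]
    have hchar : ∀ k : Int, ((1:Int) ≤ k ∧ k ≤ (0:Int)) ↔
        (0 ≤ a1x + (a1x - a2x) * k ∧ a1x + (a1x - a2x) * k ≤ max_x ∧
         0 ≤ a1y + (a1y - a2y) * k ∧ a1y + (a1y - a2y) * k ≤ max_y) := by
      intro k
      constructor
      · intro h; omega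
      · rintro ⟨c1, c2, c3, c4⟩
        exfalso
        obtain ⟨hdx, hrest⟩ := h1
        rw [hdx, zero_mul, add_zero] at c1 c2
        rcases hrest with hdy | hx | hx
        · rw [hdy, zero_mul, add_zero] at c3 c4
          exact hpre ⟨by rw [Prod.mk.injEq]; constructor <;> omega, c1, c2, c3, c4⟩
        · omega
        · omega
    rw [pvAssemble max_x max_y a1x a1y a2x a2y 1 0 hchar]
    rw [PySem.List.pyRange_one_eq_nil (by norm_num), PySem.List.pyRange_neg_one_eq_nil (by norm_num)]
    simp
  · rw [if_neg h1]
    by_cases h2 : ¬a1x - a2x = 0 ∧ a1y - a2y = 0 ∧ (a1y < 0 ∨ a1y > max_y)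
    · rw [if_pos h2]
      have hchar : ∀ k : Int, ((1:Int) ≤ k ∧ k ≤ (0:Int)) ↔
          (0 ≤ a1x + (a1x - a2x) * k ∧ a1x + (a1x - a2x) * k ≤ max_x ∧
           0 ≤ a1y + (a1y - a2y) * k ∧ a1y + (a1y - a2y) * k ≤ max_y) := by
        intro k
        constructor
        · intro h; omega
        · rintro ⟨c1, c2, c3, c4⟩
          exfalso
          obtain ⟨hdx, hdy, hout⟩ := h2
          rw [hdy, zero_mul, add_zero] at c3 c4
          omega
      rw [pvAssemble max_x max_y a1x a1y a2x a2y 1 0 hchar]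
      rw [PySem.List.pyRange_one_eq_nil (by norm_num), PySem.List.pyRange_neg_one_eq_nil (by norm_num)]
      simp
    · rw [if_neg h2]
      by_cases hdx : a1x - a2x = 0
      · have hdy : ¬ a1y - a2y = 0 := by tauto
        have hxr : 0 ≤ a1x ∧ a1x ≤ max_x := by
          by_contra hc
          exact h1 ⟨hdx, by omega⟩
        rw [if_pos hdx]
        have hchar : ∀ k : Int,
            ((pvAxisBounds a1y (a1y - a2y) max_y).1 ≤ k ∧ k ≤ (pvAxisBounds a1y (a1y - a2y) max_y).2) ↔
            (0 ≤ a1x + (a1x - a2x) * k ∧ a1x + (a1x - a2x) * k ≤ max_x ∧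
             0 ≤ a1y + (a1y - a2y) * k ∧ a1y + (a1y - a2y) * k ≤ max_y) := by
          intro k
          rw [pvAxisBounds_char a1y (a1y - a2y) max_y hdy k]
          rw [hdx, zero_mul, add_zero]
          constructor
          · rintro ⟨c3, c4⟩; exact ⟨hxr.1, hxr.2, c3, c4⟩
          · rintro ⟨_, _, c3, c4⟩; exact ⟨c3, c4⟩
        exact pvAssemble max_x max_y a1x a1y a2x a2y _ _ hchar
      · rw [if_neg hdx]
        by_cases hdy : a1y - a2y = 0
        · have hyr : 0 ≤ a1y ∧ a1y ≤ max_y := by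
            by_contra hc
            exact h2 ⟨hdx, hdy, by omega⟩
          rw [if_pos hdy]
          have hchar : ∀ k : Int,
              ((pvAxisBounds a1x (a1x - a2x) max_x).1 ≤ k ∧ k ≤ (pvAxisBounds a1x (a1x - a2x) max_x).2) ↔
              (0 ≤ a1x + (a1x - a2x) * k ∧ a1x + (a1x - a2x) * k ≤ max_x ∧
               0 ≤ a1y + (a1y - a2y) * k ∧ a1y + (a1y - a2y) * k ≤ max_y) := by
            intro k
            rw [pvAxisBounds_char a1x (a1x - a2x) max_x hdx k]
            rw [hdy, zero_mul, add_zero]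
            constructor
            · rintro ⟨c1, c2⟩; exact ⟨c1, c2, hyr.1, hyr.2⟩
            · rintro ⟨c1, c2, _, _⟩; exact ⟨c1, c2⟩
          exact pvAssemble max_x max_y a1x a1y a2x a2y _ _ hchar
        · rw [if_neg hdy]
          have hchar : ∀ k : Int,
              (max (pvAxisBounds a1x (a1x - a2x) max_x).1 (pvAxisBounds a1y (a1y - a2y) max_y).1 ≤ k ∧
               k ≤ min (pvAxisBounds a1x (a1x - a2x) max_x).2 (pvAxisBounds a1y (a1y - a2y) max_y).2) ↔
              (0 ≤ a1x + (a1x - a2x) * k ∧ a1x + (a1x - a2x) * k ≤ max_x ∧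
               0 ≤ a1y + (a1y - a2y) * k ∧ a1y + (a1y - a2y) * k ≤ max_y) := by
            intro k
            have hx := pvAxisBounds_char a1x (a1x - a2x) max_x hdx k
            have hy := pvAxisBounds_char a1y (a1y - a2y) max_y hdy k
            rw [max_le_iff, le_min_iff]
            constructor
            · rintro ⟨⟨l1, l2⟩, r1, r2⟩
              obtain ⟨c1, c2⟩ := hx.mp ⟨l1, r1⟩
              obtain ⟨c3, c4⟩ := hy.mp ⟨l2, r2⟩
              exact ⟨c1, c2, c3, c4⟩
            · rintro ⟨c1, c2, c3, c4⟩
              obtain ⟨l1, r1⟩ := hx.mpr ⟨c1, c2⟩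
              obtain ⟨l2, r2⟩ := hy.mpr ⟨c3, c4⟩
              exact ⟨⟨l1, l2⟩, r1, r2⟩
          exact pvAssemble max_x max_y a1x a1y a2x a2y _ _ hchar
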